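-- pv_equiv track=rewrite | github.com/taylorott/Advent_of_Code | src/Year_2022/Day05/Solution.py | convert_cargo_to_stacks
-- ===== SOURCE A (Python) =====
-- def convert_cargo_to_stacks(cargo):
--     stack_list = []
--     for i in range(len(cargo[0])):
--         stack_list.append([])
--
--         j = len(cargo)-2
--         while j>=0 and cargo[j][i]!=' ':
--             stack_list[i].append(cargo[j][i])
--             j-=1
--
--     return stack_list
-- ===== SOURCE B (Python) =====
-- def convert_cargo_to_stacks(cargo):
--     width = len(cargo[0])
--     stacks = [[] for _ in range(width)]
--     active = list(range(width))
--     for j in range(len(cargo) - 2, -1, -1):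
--         row = cargo[j]
--         active = [i for i in active if row[i] != ' ']
--         for i in active:
--             stacks[i].append(row[i])
--     return stacks
-- ===== Notes on version B (the rewrite author's own statement) =====
-- stated objective: alternative
-- what changed: Replaces A's independent per-column upward climbs (one while-loop per column) by a single bottom-up pass over the rows that appends to every still-active column at once, tracking the active columns in a list.
import Mathlib
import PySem

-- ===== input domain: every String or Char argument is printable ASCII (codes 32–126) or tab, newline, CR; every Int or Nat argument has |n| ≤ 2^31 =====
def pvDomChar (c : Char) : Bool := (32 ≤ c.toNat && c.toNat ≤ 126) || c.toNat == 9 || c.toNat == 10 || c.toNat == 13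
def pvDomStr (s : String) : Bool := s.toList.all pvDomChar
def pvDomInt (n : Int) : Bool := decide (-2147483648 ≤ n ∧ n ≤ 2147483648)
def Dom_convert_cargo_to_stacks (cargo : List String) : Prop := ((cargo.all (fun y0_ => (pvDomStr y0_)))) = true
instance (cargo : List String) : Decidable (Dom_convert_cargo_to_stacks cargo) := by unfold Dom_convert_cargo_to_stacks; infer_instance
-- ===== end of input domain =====

-- B replaces A's independent per-column upward climbs by a single bottom-up pass over the
-- rows that updates all still-active columns at once (objective: alternative decomposition,
-- same asymptotic cost). Equivalence is proved on exactly the inputs where the Python A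
-- returns (Pre_ below); both Pythons raise IndexError outside it.

-- ===== PORT A =====
-- cargo[j][i] for Nat j, i; out of range is an IndexError in Python (excluded by Pre_),
-- read here as the stopping character ' '.
def pvCharAt (rows : List (List Char)) (j i : Nat) : Char := (rows.getD j []).getD i ' '

-- the 'while j>=0 and cargo[j][i]!=' '' climb for column i; fuel f+1 means current j = f,
-- so the initial fuel is len(cargo)-1 (j starts at len(cargo)-2)
def pvClimbA (rows : List (List Char)) (i : Nat) : Nat → List String → List String
  | 0, acc => acc
  | f+1, acc =>
    if pvCharAt rows f i = ' ' then acc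
    else pvClimbA rows i f (acc ++ [String.ofList [pvCharAt rows f i]])

def convert_cargo_to_stacks (cargo : List String) : List (List String) :=
  let rows := cargo.map String.toList
  -- len(cargo[0]) raises on empty cargo (excluded by Pre_); read as 0 here
  (List.range (rows.headD []).length).map (fun i => pvClimbA rows i (cargo.length - 1) [])

-- ===== PORT B =====
-- stacks[i].append(c) on a Python list of lists
def pvAppendAt (st : List (List String)) (i : Nat) (c : Char) : List (List String) :=
  st.set i (st.getD i [] ++ [String.ofList [c]])

-- one row of B's bottom-up pass: filter the active columns, then push onto the survivors
def pvRowStep (rows : List (List Char)) (j : Nat)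
    (st : List (List String) × List Nat) : List (List String) × List Nat :=
  let act' := st.2.filter (fun i => pvCharAt rows j i ≠ ' ')
  (act'.foldl (fun s i => pvAppendAt s i (pvCharAt rows j i)) st.1, act')

-- 'for j in range(len(cargo)-2, -1, -1)'; fuel f+1 means current j = f
def pvLoopB (rows : List (List Char)) :
    Nat → List (List String) × List Nat → List (List String) × List Nat
  | 0, st => st
  | f+1, st => pvLoopB rows f (pvRowStep rows f st)

def convert_cargo_to_stacks_alt (cargo : List String) : List (List String) :=
  let rows := cargo.map String.toList
  let width := (rows.headD []).length
  (pvLoopB rows (cargo.length - 1) (List.replicate width [], List.range width)).1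

-- ===== PRECONDITION & SPEC =====
-- Pre_ is exactly the set of inputs on which the Python A returns (checked by brute force):
-- cargo is nonempty, and whenever a row j above the last one is too short for a column i of
-- the first row, some reachable lower row j' carries a space that stops column i's climb
-- before row j is read; outside Pre_ both Pythons raise IndexError.
def Pre_convert_cargo_to_stacks (cargo : List String) : Prop :=
  cargo ≠ [] ∧
  ∀ i < (cargo.headD "").toList.length, ∀ j < cargo.length - 1,
    (cargo.getD j "").toList.length ≤ i →
      ∃ j' < cargo.length - 1, j < j' ∧ i < (cargo.getD j' "").toList.length ∧
        (cargo.getD j' "").toList.getD i ' ' = ' '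
instance (cargo : List String) : Decidable (Pre_convert_cargo_to_stacks cargo) := by
  unfold Pre_convert_cargo_to_stacks; infer_instance

def pvWitness_convert_cargo_to_stacks : List String := ["ab", "cd"]

def Spec_convert_cargo_to_stacks (cargo : List String) (out : List (List String)) : Prop := out = convert_cargo_to_stacks_alt cargo
instance (cargo : List String) (out : List (List String)) : Decidable (Spec_convert_cargo_to_stacks cargo out) := by unfold Spec_convert_cargo_to_stacks; infer_instance

-- ===== CLAIM (what is proved, stated in full; the proofs are below) =====
def Claim_equal_convert_cargo_to_stacks : Prop := ∀ (cargo : List String), Dom_convert_cargo_to_stacks cargo → Pre_convert_cargo_to_stacks cargo → Spec_convert_cargo_to_stacks cargo (convert_cargo_to_stacks cargo)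

-- ===== LEMMAS AND PROOFS =====

-- column i is still active after the rows below row f have been processed
def pvAlive (rows : List (List Char)) (i : Nat) : Nat → Bool
  | 0 => true
  | f+1 => decide (pvCharAt rows f i ≠ ' ') && pvAlive rows i f

theorem pvMapIdx_id {α : Type} (l : List α) : l.mapIdx (fun _ s => s) = l := by
  apply List.ext_getElem <;> simp

theorem pvClimbA_acc (rows : List (List Char)) (i : Nat) :
    ∀ f acc, pvClimbA rows i f acc = acc ++ pvClimbA rows i f [] := by
  intro f
  induction f with
  | zero => intro acc; simp [pvClimbA]
  | succ f ih =>
    intro acc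
    simp only [pvClimbA]
    split
    · simp
    · rw [ih (acc ++ _), ih ([] ++ _)]
      simp

theorem pvFold_append (rows : List (List Char)) (j : Nat) :
    ∀ (act : List Nat) (st : List (List String)), act.Nodup →
      (∀ i ∈ act, i < st.length) →
      act.foldl (fun s i => pvAppendAt s i (pvCharAt rows j i)) st =
        st.mapIdx (fun i s => if i ∈ act then s ++ [String.ofList [pvCharAt rows j i]] else s) := by
  intro act
  induction act with
  | nil =>
    intro st _ _
    simp [pvMapIdx_id]
  | cons a rest ih =>
    intro st hnd hlen
    have ha : a < st.length := hlen a (by simp)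
    have hnd' : rest.Nodup := (List.nodup_cons.mp hnd).2
    have hna : a ∉ rest := (List.nodup_cons.mp hnd).1
    simp only [List.foldl_cons]
    rw [ih (pvAppendAt st a (pvCharAt rows j a)) hnd'
        (by intro i hi; simpa [pvAppendAt] using hlen i (by simp [hi]))]
    apply List.ext_getElem
    · simp [pvAppendAt]
    · intro k hk1 hk2
      simp only [List.getElem_mapIdx, pvAppendAt, List.getElem_set,
        List.getD_eq_getElem?_getD]
      by_cases hka : k = a
      · subst hka
        simp [hna, List.getElem?_eq_getElem ha]
      · simp [List.mem_cons, hka, Ne.symm hka]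

theorem pvLoopB_eq (rows : List (List Char)) :
    ∀ (f : Nat) (st : List (List String)) (act : List Nat), act.Nodup →
      (∀ i ∈ act, i < st.length) →
      pvLoopB rows f (st, act) =
        (st.mapIdx (fun i s => if i ∈ act then s ++ pvClimbA rows i f [] else s),
         act.filter (fun i => pvAlive rows i f)) := by
  intro f
  induction f with
  | zero =>
    intro st act _ _
    simp [pvLoopB, pvAlive, pvClimbA, pvMapIdx_id]
  | succ f ih =>
    intro st act hnd hlen
    simp only [pvLoopB, pvRowStep]
    have hnd' : (act.filter (fun i => pvCharAt rows f i ≠ ' ')).Nodup := hnd.filter _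
    have hsub : ∀ i ∈ act.filter (fun i => pvCharAt rows f i ≠ ' '), i ∈ act := by
      intro i hi; exact (List.mem_filter.mp hi).1
    rw [pvFold_append rows f _ st hnd' (fun i hi => hlen i (hsub i hi))]
    rw [ih _ _ hnd' (by intro i hi; simpa using hlen i (hsub i hi))]
    refine Prod.ext ?_ ?_
    ·
      apply List.ext_getElem
      · simp
      · intro k hk1 hk2
        simp only [List.getElem_mapIdx, List.mem_filter]
        by_cases hmem : k ∈ act
        · by_cases hsp : pvCharAt rows f k = ' '
          · simp [pvClimbA, hmem, hsp]
          · simp only [pvClimbA, if_neg hsp]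
            rw [pvClimbA_acc rows k f ([] ++ _)]
            simp [hmem, hsp]
        · simp [hmem]
    ·
      rw [List.filter_filter]
      apply List.filter_congr
      intro i _
      simp [pvAlive, Bool.and_comm]

-- the two ports agree on every input (out-of-range reads are totalized identically)
theorem pvPorts_core (rows : List (List Char)) (n : Nat) :
    (List.range (rows.headD []).length).map (fun i => pvClimbA rows i n []) =
      (pvLoopB rows n
        (List.replicate (rows.headD []).length [], List.range (rows.headD []).length)).1 := by
  rw [pvLoopB_eq rows n (List.replicate (rows.headD []).length [])
      (List.range (rows.headD []).length)
      (List.nodup_range) (by intro i hi; simpa using List.mem_range.mp hi)]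
  apply List.ext_getElem
  · simp
  · intro k hk1 hk2
    have hkw : k < (rows.head?.getD []).length := by
      simpa [List.headD_eq_head?_getD] using hk1
    simp [List.getElem_mapIdx, hkw]

theorem pvPorts_eq (cargo : List String) :
    convert_cargo_to_stacks cargo = convert_cargo_to_stacks_alt cargo := by
  simp only [convert_cargo_to_stacks, convert_cargo_to_stacks_alt]
  exact pvPorts_core (cargo.map String.toList) (cargo.length - 1)

-- ===== VERDICT (by name: the statement is the Claim_ definition above) =====
theorem convert_cargo_to_stacks_spec : Claim_equal_convert_cargo_to_stacks := by
  intro cargo _ _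
  unfold Spec_convert_cargo_to_stacks
  exact pvPorts_eq cargo
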